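-- pv_equiv track=rewrite | github.com/ALTA-DE1-iwang-24Feb2000/Algo-DS-Part2 | problem3/main.py | playing_domino
-- ===== SOURCE A (Python) =====
-- def playing_domino(cards, deck):
--
--     max_count = 0
--     max_card = None
--
--     for card in cards:
--         if card[0] in deck or card[1] in deck:
--             count = cards.count(card)
--             if count > max_count:
--                 max_count = count
--                 max_card = card
--
--     return max_card if max_card else []
-- ===== SOURCE B (Python) =====
-- def playing_domino(cards, deck):
--     # Group-extraction: repeatedly strip the whole equal-group of the first card
--     # from a shrinking working list; the group size is the card's count.
--     best_cnt = 0
--     best_card = []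
--     rest = cards
--     while rest:
--         c = rest[0]
--         smaller = [x for x in rest if x != c]
--         cnt = len(rest) - len(smaller)
--         if (c[0] in deck or c[1] in deck) and cnt > best_cnt:
--             best_cnt, best_card = cnt, c
--         rest = smaller
--     return best_card
-- ===== Notes on version B (the rewrite author's own statement) =====
-- stated objective: alternative
-- what changed: Replaced A's pass over every card with a repeated cards.count scan by a group-extraction loop: strip the entire equal-group of the first card from a shrinking working list, taking the group size (length difference) as its count, so each distinct card is handled once and list.count disappears.
import Mathlib
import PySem

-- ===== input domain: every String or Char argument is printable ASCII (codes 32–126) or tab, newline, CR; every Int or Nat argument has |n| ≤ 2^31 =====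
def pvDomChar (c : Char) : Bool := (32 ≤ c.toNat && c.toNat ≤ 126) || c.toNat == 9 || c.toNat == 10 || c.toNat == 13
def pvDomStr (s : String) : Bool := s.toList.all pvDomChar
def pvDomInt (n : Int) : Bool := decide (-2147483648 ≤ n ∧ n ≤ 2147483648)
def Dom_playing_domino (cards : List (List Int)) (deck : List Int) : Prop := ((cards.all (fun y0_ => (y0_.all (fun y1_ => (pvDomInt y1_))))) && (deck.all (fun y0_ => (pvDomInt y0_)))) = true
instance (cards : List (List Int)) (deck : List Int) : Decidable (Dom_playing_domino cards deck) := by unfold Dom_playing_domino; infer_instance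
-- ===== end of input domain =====

-- B replaces A's repeated cards.count scan by a group-extraction loop over a shrinking
-- working list (each distinct card handled once, its count read off as a length difference).

-- ===== PORT A =====
-- transliteration of the Python condition `card[0] in deck or card[1] in deck`
-- (short-circuit kept; a `none` from pyGet? — Python's IndexError — is excluded by Pre_)
def pdTouch (card : List Int) (deck : List Int) : Bool :=
  match PySem.List.pyGet? card 0 with
  | none => false
  | some x =>
    if deck.contains x then true
    else
      match PySem.List.pyGet? card 1 with
      | none => false
      | some y => deck.contains y

-- the body of A's `for card in cards:` loop
def pdStepA (cards : List (List Int)) (deck : List Int)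
    (s : Int × Option (List Int)) (card : List Int) : Int × Option (List Int) :=
  if pdTouch card deck then
    let count := PySem.List.count cards card
    if (count : Int) > s.1 then ((count : Int), some card) else s
  else s

def playing_domino (cards : List (List Int)) (deck : List Int) : List Int :=
  match (cards.foldl (pdStepA cards deck) (0, none)).2 with
  | none => []
  | some card => if card = [] then [] else card   -- `max_card if max_card else []` truthiness

-- ===== PORT B =====
-- B's `while rest:` loop: strip the first card's whole equal-group, count = length difference
def pdLoop (deck : List Int) (s : Int × List Int) (rest : List (List Int)) : Int × List Int :=
  match rest with
  | [] => s
  | c :: t =>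
    let smaller := (c :: t).filter (fun x => x ≠ c)
    let cnt : Int := ((c :: t).length : Int) - (smaller.length : Int)
    pdLoop deck (if pdTouch c deck && decide (s.1 < cnt) then (cnt, c) else s) smaller
termination_by rest.length
decreasing_by
  simp only [List.filter_cons, ne_eq, not_true_eq_false, decide_false,
    Bool.false_eq_true, if_false, List.length_cons]
  exact Nat.lt_succ_of_le (List.length_filter_le _ _)

def playing_domino_alt (cards : List (List Int)) (deck : List Int) : List Int :=
  (pdLoop deck (0, []) cards).2

-- ===== PRECONDITION & SPEC =====
-- Pre_ excludes exactly the inputs where Python A raises IndexError: a card with fewer than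
-- two values, unless it has exactly one value and that value is in the deck (short-circuit).
def Pre_playing_domino (cards : List (List Int)) (deck : List Int) : Prop :=
  ∀ c ∈ cards, 2 ≤ c.length ∨ (c.length = 1 ∧ c.headI ∈ deck)
instance (cards : List (List Int)) (deck : List Int) : Decidable (Pre_playing_domino cards deck) := by unfold Pre_playing_domino; infer_instance

def pvWitness_playing_domino : List (List Int) × List Int := ([[1, 2], [3, 4], [1, 2]], [2, 5])

def Spec_playing_domino (cards : List (List Int)) (deck : List Int) (out : List Int) : Prop := out = playing_domino_alt cards deck
instance (cards : List (List Int)) (deck : List Int) (out : List Int) : Decidable (Spec_playing_domino cards deck out) := by unfold Spec_playing_domino; infer_instance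

-- ===== CLAIM (what is proved, stated in full; the proofs are below) =====
def Claim_equal_playing_domino : Prop := ∀ (cards : List (List Int)) (deck : List Int), Dom_playing_domino cards deck → Pre_playing_domino cards deck → Spec_playing_domino cards deck (playing_domino cards deck)

-- ===== LEMMAS AND PROOFS =====

-- let-free, Prop-conditioned view of A's loop body
def pdStepA' (cards : List (List Int)) (deck : List Int)
    (s : Int × Option (List Int)) (card : List Int) : Int × Option (List Int) :=
  if pdTouch card deck = true ∧ s.1 < (List.count card cards : Int) then
    ((List.count card cards : Int), some card) else s

theorem pdStepA_eq (cards : List (List Int)) (deck : List Int) :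
    pdStepA cards deck = pdStepA' cards deck := by
  funext s card
  simp only [pdStepA, pdStepA', PySem.List.count_eq]
  by_cases ht : pdTouch card deck = true
  · by_cases hgt : s.1 < (List.count card cards : Int)
    · rw [if_pos ht, if_pos (by omega), if_pos ⟨ht, hgt⟩]
    · rw [if_pos ht, if_neg (by omega), if_neg (by tauto)]
  · rw [if_neg ht, if_neg (by tauto)]

-- first-occurrence dedup relative to a seen set
def pdDDF (seen : List (List Int)) : List (List Int) → List (List Int)
  | [] => []
  | c :: l => if c ∈ seen then pdDDF seen l else c :: pdDDF (c :: seen) l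

theorem pdDDF_congr (seen₁ seen₂ : List (List Int)) (l : List (List Int))
    (h : ∀ x, x ∈ seen₁ ↔ x ∈ seen₂) : pdDDF seen₁ l = pdDDF seen₂ l := by
  induction l generalizing seen₁ seen₂ with
  | nil => rfl
  | cons c l ih =>
    simp only [pdDDF]
    by_cases hc : c ∈ seen₁
    · rw [if_pos hc, if_pos ((h c).mp hc)]
      exact ih _ _ h
    · rw [if_neg hc, if_neg (fun hx => hc ((h c).mpr hx))]
      refine congrArg _ (ih _ _ ?_)
      intro x; simp only [List.mem_cons]
      exact or_congr Iff.rfl (h x)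

-- pushing an element into `seen` is the same as pre-filtering it out of the list
theorem pdDDF_cons_seen (c : List Int) (l : List (List Int)) :
    ∀ seen, pdDDF (c :: seen) l = pdDDF seen (l.filter (fun x => x ≠ c)) := by
  induction l with
  | nil => intro seen; rfl
  | cons d l ih =>
    intro seen
    by_cases hdc : d = c
    · subst hdc
      simp only [pdDDF, List.filter_cons, ne_eq, not_true_eq_false, decide_false,
        Bool.false_eq_true, if_false, List.mem_cons, true_or, if_true]
      exact ih seen
    · simp only [pdDDF, List.filter_cons, ne_eq, not_false_eq_true, decide_true, if_true,
        List.mem_cons, hdc, false_or]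
      by_cases hds : d ∈ seen
      · rw [if_pos hds, if_pos hds]; exact ih seen
      · rw [if_neg hds, if_neg hds]
        refine congrArg _ ?_
        rw [pdDDF_congr (d :: c :: seen) (c :: d :: seen) l
          (by intro x; simp only [List.mem_cons]; tauto)]
        exact ih (d :: seen)

theorem pdStepA'_fst_mono (cards : List (List Int)) (deck : List Int)
    (s : Int × Option (List Int)) (card : List Int) :
    s.1 ≤ (pdStepA' cards deck s card).1 := by
  unfold pdStepA'
  split_ifs with h
  · simp; omega
  · exact le_refl _

theorem pdStepA'_count_le (cards : List (List Int)) (deck : List Int)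
    (s : Int × Option (List Int)) (card : List Int) (ht : pdTouch card deck = true) :
    (List.count card cards : Int) ≤ (pdStepA' cards deck s card).1 := by
  unfold pdStepA'
  split_ifs with h
  · simp
  · simp only [ht, true_and, not_lt] at h
    exact h

-- duplicates are absorbed: folding A's step over a list equals folding it over the
-- first occurrences, given every seen touching card already has count ≤ s.1
theorem pdFoldA_dedup (cards : List (List Int)) (deck : List Int) :
    ∀ (l : List (List Int)) (seen : List (List Int)) (s : Int × Option (List Int)),
    (∀ c ∈ seen, pdTouch c deck = true → (List.count c cards : Int) ≤ s.1) →
    l.foldl (pdStepA' cards deck) s = (pdDDF seen l).foldl (pdStepA' cards deck) s := by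
  intro l
  induction l with
  | nil => intro seen s _; rfl
  | cons c l ih =>
    intro seen s hinv
    simp only [List.foldl_cons, pdDDF]
    by_cases hc : c ∈ seen
    · rw [if_pos hc]
      have hstep : pdStepA' cards deck s c = s := by
        unfold pdStepA'
        rw [if_neg (by rintro ⟨ht, hgt⟩; exact absurd hgt (by have := hinv c hc ht; omega))]
      rw [hstep]
      exact ih seen s hinv
    · rw [if_neg hc]
      simp only [List.foldl_cons]
      refine ih (c :: seen) (pdStepA' cards deck s c) ?_
      intro x hx htx
      rcases List.mem_cons.mp hx with rfl | hxs
      · exact pdStepA'_count_le cards deck s x htx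
      · exact le_trans (hinv x hxs htx) (pdStepA'_fst_mono cards deck s c)

-- A's fold only ever stores a touching card
theorem pdFoldA_touch (cards : List (List Int)) (deck : List Int) :
    ∀ (l : List (List Int)) (s : Int × Option (List Int)),
    (∀ c, s.2 = some c → pdTouch c deck = true) →
    ∀ c, (l.foldl (pdStepA' cards deck) s).2 = some c → pdTouch c deck = true := by
  intro l
  induction l with
  | nil => intro s h; exact h
  | cons k l ih =>
    intro s h
    simp only [List.foldl_cons]
    refine ih _ ?_
    intro c hc
    unfold pdStepA' at hc
    split_ifs at hc with hcond
    · simp only at hc; cases hc; exact hcond.1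
    · exact h c hc

-- pdTouch never holds for the empty card
theorem pdTouch_nil (deck : List Int) : pdTouch [] deck = false := by
  simp [pdTouch, PySem.List.pyGet?, PySem.List.pyIdx?]

def pdCard0 : Option (List Int) → List Int
  | none => []
  | some c => c

-- the group size B reads off as a length difference is the head's count in the working list
theorem pdCnt (c : List Int) (t : List (List Int)) :
    (((c :: t).length : Int) - (((c :: t).filter (fun x => x ≠ c)).length : Int))
      = (List.count c (c :: t) : Int) := by
  have h1 : (c :: t).length
      = ((c :: t).filter (fun x => x ≠ c)).length
        + ((c :: t).filter (fun x => !(decide (x ≠ c)))).length :=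
    List.length_eq_length_filter_add _
  have h2 : List.count c (c :: t) = ((c :: t).filter (fun x => x == c)).length := by
    simp [List.count_eq_countP, List.countP_eq_length_filter]
  have h3 : (c :: t).filter (fun x => !(decide (x ≠ c))) = (c :: t).filter (fun x => x == c) := by
    apply List.filter_congr
    intro x _
    by_cases h : x = c <;> simp [h]
  rw [h3] at h1
  omega

-- filtering out c preserves the count of every other card
theorem pdCountFilter (x c : List Int) (l : List (List Int)) (hxc : x ≠ c) :
    List.count x (l.filter (fun y => y ≠ c)) = List.count x l := by
  induction l with
  | nil => rfl
  | cons d l ih =>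
    by_cases hdc : d = c
    · subst hdc
      have hxd : x ≠ d := hxc
      simp only [List.filter_cons, ne_eq, not_true_eq_false, decide_false, Bool.false_eq_true,
        if_false, List.count_cons, ih]
      simp [beq_iff_eq, Ne.symm hxd]
    · simp only [List.filter_cons, ne_eq, hdc, not_false_eq_true, decide_true, if_true,
        List.count_cons, ih]

-- lockstep: B's shrinking-list loop computes A's fold over the first occurrences
theorem pdMain (cards : List (List Int)) (deck : List Int) :
    ∀ (n : Nat) (lst : List (List Int)), lst.length ≤ n →
    (∀ x ∈ lst, List.count x lst = List.count x cards) →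
    ∀ (mc : Int) (mcard : Option (List Int)),
    pdLoop deck (mc, pdCard0 mcard) lst
      = (((pdDDF [] lst).foldl (pdStepA' cards deck) (mc, mcard)).1,
         pdCard0 ((pdDDF [] lst).foldl (pdStepA' cards deck) (mc, mcard)).2) := by
  intro n
  induction n with
  | zero =>
    intro lst hlen _ mc mcard
    have : lst = [] := List.length_eq_zero_iff.mp (Nat.le_zero.mp hlen)
    subst this
    simp [pdLoop, pdDDF]
  | succ n ih =>
    intro lst hlen hinv mc mcard
    match lst with
    | [] => simp [pdLoop, pdDDF]
    | c :: t =>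
      have hdd : pdDDF ([] : List (List Int)) (c :: t)
          = c :: pdDDF [] ((c :: t).filter (fun x => x ≠ c)) := by
        have h0 : pdDDF ([] : List (List Int)) (c :: t) = c :: pdDDF [c] t := by
          simp [pdDDF]
        rw [h0, pdDDF_cons_seen c t []]
        have : (c :: t).filter (fun x => x ≠ c) = t.filter (fun x => x ≠ c) := by
          simp
        rw [this]
      have hc1 : List.count c (c :: t) = List.count c cards :=
        hinv c (List.mem_cons_self)
      have hcnt : (((c :: t).length : Int) - (((c :: t).filter (fun x => x ≠ c)).length : Int))
          = (List.count c cards : Int) := by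
        rw [pdCnt, hc1]
      rw [hdd]
      simp only [pdLoop, List.foldl_cons]
      have hsmall : ((c :: t).filter (fun x => x ≠ c)).length ≤ n := by
        have h1 : (c :: t).filter (fun x => x ≠ c) = t.filter (fun x => x ≠ c) := by
          simp
        rw [h1]
        have := List.length_filter_le (fun x => decide (x ≠ c)) t
        simp only [List.length_cons] at hlen
        omega
      have hinv' : ∀ x ∈ (c :: t).filter (fun x => x ≠ c),
          List.count x ((c :: t).filter (fun x => x ≠ c)) = List.count x cards := by
        intro x hx
        have hxc : x ≠ c := by
          have := List.of_mem_filter hx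
          simpa using this
        rw [pdCountFilter x c (c :: t) hxc]
        exact hinv x (List.mem_of_mem_filter hx)
      by_cases hcond : pdTouch c deck = true ∧ mc < (List.count c cards : Int)
      · have hbool : (pdTouch c deck &&
            decide (mc < ((c :: t).length : Int) - (((c :: t).filter (fun x => x ≠ c)).length : Int))) = true := by
          rw [hcnt]; simp [hcond.1, hcond.2]
        rw [if_pos hbool]
        have hstep : pdStepA' cards deck (mc, mcard) c
            = ((List.count c cards : Int), some c) := by
          unfold pdStepA'; rw [if_pos hcond]
        rw [hstep, hcnt]
        exact ih _ hsmall hinv' (List.count c cards : Int) (some c)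
      · have hbool : (pdTouch c deck &&
            decide (mc < ((c :: t).length : Int) - (((c :: t).filter (fun x => x ≠ c)).length : Int))) = false := by
          rw [hcnt]
          rcases not_and_or.mp hcond with h | h
          · simp only [Bool.and_eq_false_iff]
            exact Or.inl (by simpa using h)
          · simp only [Bool.and_eq_false_iff, decide_eq_false_iff_not]; tauto
        rw [if_neg (by rw [hbool]; exact Bool.false_ne_true)]
        have hstep : pdStepA' cards deck (mc, mcard) c = (mc, mcard) := by
          unfold pdStepA'; rw [if_neg hcond]
        rw [hstep]
        exact ih _ hsmall hinv' mc mcard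

-- ===== VERDICT (by name: the statement is the Claim_ definition above) =====
theorem playing_domino_spec : Claim_equal_playing_domino := by
  intro cards deck _ _
  unfold Spec_playing_domino playing_domino playing_domino_alt
  rw [pdStepA_eq cards deck,
      pdFoldA_dedup cards deck cards [] (0, none) (by intro c hc; simp at hc)]
  have hmain := pdMain cards deck cards.length cards (le_refl _)
    (fun x _ => rfl) 0 none
  have h0 : pdCard0 none = ([] : List Int) := rfl
  rw [h0] at hmain
  rw [hmain]
  cases hres : ((pdDDF [] cards).foldl (pdStepA' cards deck) (0, none)).2 with
  | none => simp [pdCard0]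
  | some c =>
    have htc := pdFoldA_touch cards deck cards (0, none) (by intro c hc; cases hc) c
      (by rw [← pdFoldA_dedup cards deck cards [] (0, none) (by intro c hc; simp at hc)] at hres
          exact hres)
    have hne : c ≠ [] := by
      intro h; rw [h, pdTouch_nil] at htc; exact absurd htc (by simp)
    simp [pdCard0, hne]
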